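-- pv_equiv track=rewrite | github.com/adrianjohnsaker/Numogam_Luna | multimodal_discovery_capture_system.py | _identify_word_semantic_fields
-- ===== SOURCE A (Python) =====
-- from typing import Dict, List, Any, Optional, Tuple, Callable, Union, Set
--
-- def _identify_word_semantic_fields(words: List[str]) -> Dict[str, List[str]]:
--     """Identify semantic fields in word list"""
--     semantic_fields = {
--         "emotion": ["happy", "sad", "angry", "excited", "calm", "nervous", "joy", "fear"],
--         "nature": ["tree", "flower", "river", "mountain", "sky", "earth", "wind", "fire"],
--         "technology": ["computer", "algorithm", "digital", "network", "system", "data"],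
--         "time": ["past", "future", "now", "yesterday", "tomorrow", "eternal", "moment"],
--         "space": ["above", "below", "near", "far", "inside", "outside", "dimension"],
--         "abstract": ["concept", "idea", "thought", "theory", "principle", "essence"]
--     }
--
--     found_fields = {}
--     for field, field_words in semantic_fields.items():
--         matches = [word for word in words if word in field_words]
--         if matches:
--             found_fields[field] = matches
--
--     return found_fields
-- ===== SOURCE B (Python) =====
-- from typing import Dict, List
--
-- _SEMANTIC_FIELDS = {
--     "emotion": ["happy", "sad", "angry", "excited", "calm", "nervous", "joy", "fear"],
--     "nature": ["tree", "flower", "river", "mountain", "sky", "earth", "wind", "fire"],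
--     "technology": ["computer", "algorithm", "digital", "network", "system", "data"],
--     "time": ["past", "future", "now", "yesterday", "tomorrow", "eternal", "moment"],
--     "space": ["above", "below", "near", "far", "inside", "outside", "dimension"],
--     "abstract": ["concept", "idea", "thought", "theory", "principle", "essence"]
-- }
--
-- # reverse index: word -> its (unique) semantic field
-- _FIELD_OF = {w: f for f, ws in _SEMANTIC_FIELDS.items() for w in ws}
--
-- def _identify_word_semantic_fields(words: List[str]) -> Dict[str, List[str]]:
--     """Identify semantic fields in word list (single pass over words via a reverse index)."""
--     groups = {f: [] for f in _SEMANTIC_FIELDS}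
--     for w in words:
--         f = _FIELD_OF.get(w)
--         if f is not None:
--             groups[f].append(w)
--     return {f: ws for f, ws in groups.items() if ws}
-- ===== Notes on version B (the rewrite author's own statement) =====
-- stated objective: faster
-- what changed: B precomputes a word-to-field reverse-lookup dict from the same table and groups the input in a single pass over words, instead of A's one filtering pass over words per semantic field with a list-membership test.
import Mathlib
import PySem

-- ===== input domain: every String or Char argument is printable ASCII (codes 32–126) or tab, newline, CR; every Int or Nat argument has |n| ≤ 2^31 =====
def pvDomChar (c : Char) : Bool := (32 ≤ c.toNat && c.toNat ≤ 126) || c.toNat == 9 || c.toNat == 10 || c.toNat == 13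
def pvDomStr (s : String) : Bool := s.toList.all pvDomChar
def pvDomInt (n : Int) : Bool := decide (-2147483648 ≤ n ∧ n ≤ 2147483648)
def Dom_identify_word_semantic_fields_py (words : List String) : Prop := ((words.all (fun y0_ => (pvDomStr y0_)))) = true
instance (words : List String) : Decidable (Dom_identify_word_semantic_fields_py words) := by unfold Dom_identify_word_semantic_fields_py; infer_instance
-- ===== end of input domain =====

-- B replaces A's per-field scans of `words` by a precomputed word→field reverse index
-- and a single pass over `words` (measured faster in a timing run).

-- the hard-coded semantic_fields table, shared by both ports
def pvFields : List (String × List String) :=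
  [ ("emotion", ["happy", "sad", "angry", "excited", "calm", "nervous", "joy", "fear"]),
    ("nature", ["tree", "flower", "river", "mountain", "sky", "earth", "wind", "fire"]),
    ("technology", ["computer", "algorithm", "digital", "network", "system", "data"]),
    ("time", ["past", "future", "now", "yesterday", "tomorrow", "eternal", "moment"]),
    ("space", ["above", "below", "near", "far", "inside", "outside", "dimension"]),
    ("abstract", ["concept", "idea", "thought", "theory", "principle", "essence"]) ]

-- ===== PORT A =====
-- loop body of A: matches = [word for word in words if word in field_words]; if matches: found[field] = matches
def pvAstep (words : List String) (found : PySem.Dict String (List String))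
    (fv : String × List String) : PySem.Dict String (List String) :=
  let ms := words.filter (fun w => fv.2.contains w)
  if !ms.isEmpty then found.insert fv.1 ms else found

def identify_word_semantic_fields_py (words : List String) : List (String × List String) :=
  (pvFields.foldl (pvAstep words) PySem.Dict.empty).items

-- ===== PORT B =====
-- _FIELD_OF = {w: f for f, ws in SEMANTIC_FIELDS.items() for w in ws}
def pvFieldOf : PySem.Dict String String :=
  pvFields.foldl (fun d fv => fv.2.foldl (fun d w => d.insert w fv.1) d) PySem.Dict.empty

-- loop body of B: f = _FIELD_OF.get(w); if f is not None: groups[f].append(w)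
def pvBstep (g : PySem.Dict String (List String)) (w : String) : PySem.Dict String (List String) :=
  match pvFieldOf.get? w with
  | some f => g.modify f [] (fun ws => ws ++ [w])
  | none => g

def identify_word_semantic_fields_py_alt (words : List String) : List (String × List String) :=
  let groups0 : PySem.Dict String (List String) :=
    pvFields.foldl (fun d fv => d.insert fv.1 []) PySem.Dict.empty
  let groups := words.foldl pvBstep groups0
  groups.items.filter (fun p => !p.2.isEmpty)

-- ===== PRECONDITION & SPEC =====
def Spec_identify_word_semantic_fields_py (words : List String) (out : List (String × List String)) : Prop := out = identify_word_semantic_fields_py_alt words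
instance (words : List String) (out : List (String × List String)) : Decidable (Spec_identify_word_semantic_fields_py words out) := by unfold Spec_identify_word_semantic_fields_py; infer_instance

-- ===== CLAIM (what is proved, stated in full; the proofs are below) =====
def Claim_equal_identify_word_semantic_fields_py : Prop := ∀ (words : List String), Dom_identify_word_semantic_fields_py words → Spec_identify_word_semantic_fields_py words (identify_word_semantic_fields_py words)

-- ===== LEMMAS AND PROOFS =====

set_option maxRecDepth 100000

-- every word of the table, in table order
def pvAllWords : List String := pvFields.flatMap (·.2)

-- the reverse index sends w to the (unique) field whose word list contains w
set_option maxRecDepth 100000 in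
theorem pvFieldOf_spec (f : String) (l : List String) (hfl : (f, l) ∈ pvFields) (w : String) :
    (pvFieldOf.get? w == some f) = l.contains w := by
  by_cases hw : w ∈ pvAllWords
  · have hflat : pvAllWords = ["happy", "sad", "angry", "excited", "calm", "nervous", "joy", "fear", "tree", "flower", "river", "mountain", "sky", "earth", "wind", "fire", "computer", "algorithm", "digital", "network", "system", "data", "past", "future", "now", "yesterday", "tomorrow", "eternal", "moment", "above", "below", "near", "far", "inside", "outside", "dimension", "concept", "idea", "thought", "theory", "principle", "essence"] := by decide
    rw [hflat] at hw
    simp only [List.mem_cons, List.not_mem_nil, or_false] at hw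
    simp only [pvFields, List.mem_cons, List.not_mem_nil, or_false, Prod.mk.injEq] at hfl
    rcases hfl with ⟨rfl, rfl⟩|⟨rfl, rfl⟩|⟨rfl, rfl⟩|⟨rfl, rfl⟩|⟨rfl, rfl⟩|⟨rfl, rfl⟩ <;>
      rcases hw with rfl|rfl|rfl|rfl|rfl|rfl|rfl|rfl|rfl|rfl|rfl|rfl|rfl|rfl|rfl|rfl|rfl|rfl|rfl|rfl|rfl|rfl|rfl|rfl|rfl|rfl|rfl|rfl|rfl|rfl|rfl|rfl|rfl|rfl|rfl|rfl|rfl|rfl|rfl|rfl|rfl|rfl <;> decide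
  · have hnone : pvFieldOf.get? w = none := by
      rw [PySem.Dict.get?_eq_none_iff_not_mem_keys]
      intro hk
      apply hw
      have hKeys : pvFieldOf.keys = pvAllWords := by decide
      rwa [hKeys] at hk
    have hlw : w ∉ l := by
      intro hwl
      exact hw (by simp only [pvAllWords, List.mem_flatMap]; exact ⟨(f, l), hfl, hwl⟩)
    rw [hnone]
    simpa using hlw

-- any field the reverse index produces is a key of the table
set_option maxRecDepth 100000 in
theorem pvFieldOf_mem (w f : String) (h : pvFieldOf.get? w = some f) :
    f ∈ pvFields.map Prod.fst := by
  have hm := PySem.Dict.mem_items_of_get?_eq_some pvFieldOf h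
  have hall : ∀ p ∈ pvFieldOf.items, p.2 ∈ pvFields.map Prod.fst := by decide
  exact hall _ hm

-- B's loop keeps the key list unchanged (every modified key is already present)
theorem pvB_keys (ws : List String) (g : PySem.Dict String (List String))
    (hk : ∀ f, f ∈ pvFields.map Prod.fst → g.contains f = true) :
    (ws.foldl pvBstep g).keys = g.keys := by
  induction ws generalizing g with
  | nil => rfl
  | cons w t ih =>
    simp only [List.foldl_cons]
    cases h : pvFieldOf.get? w with
    | none => rw [show pvBstep g w = g from by unfold pvBstep; rw [h]]; exact ih g hk
    | some f =>
      have hc : g.contains f = true := hk f (pvFieldOf_mem w f h)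
      have hstep : pvBstep g w = g.modify f [] (fun ws => ws ++ [w]) := by unfold pvBstep; rw [h]
      have hkeys : (g.modify f [] (fun ws => ws ++ [w])).keys = g.keys := by
        rw [PySem.Dict.keys_modify, PySem.Dict.keys_insert_of_contains]
        exact hc
      have hk' : ∀ f', f' ∈ pvFields.map Prod.fst →
          (g.modify f [] (fun ws => ws ++ [w])).contains f' = true := by
        intro f' hf'
        rw [PySem.Dict.contains_modify]
        simp [hk f' hf']
      rw [hstep, ih _ hk', hkeys]

-- B's loop accumulates, per field, exactly the words the reverse index sends there
theorem pvB_getD (ws : List String) (g : PySem.Dict String (List String)) (f : String) :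
    (ws.foldl pvBstep g).getD f [] =
      g.getD f [] ++ ws.filter (fun w => pvFieldOf.get? w == some f) := by
  induction ws generalizing g with
  | nil => simp
  | cons w t ih =>
    simp only [List.foldl_cons, List.filter_cons]
    cases h : pvFieldOf.get? w with
    | none =>
      rw [show pvBstep g w = g from by unfold pvBstep; rw [h], ih]
      simp
    | some f' =>
      rw [show pvBstep g w = g.modify f' [] (fun ws => ws ++ [w]) from by unfold pvBstep; rw [h],
        ih, PySem.Dict.getD_modify]
      by_cases hff : f = f'
      · subst hff; simp
      · have hbeq : (some f' == some f) = false := by simp [Ne.symm hff]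
        simp [hff, hbeq]

-- A's loop appends one item per field with a nonempty match list
theorem pvA_items (words : List String) (fs : List (String × List String))
    (d : PySem.Dict String (List String))
    (hfresh : ∀ fv ∈ fs, d.contains fv.1 = false) (hnd : (fs.map Prod.fst).Nodup) :
    (fs.foldl (pvAstep words) d).items =
      d.items ++ fs.filterMap (fun fv =>
        let m := words.filter (fun w => fv.2.contains w)
        if !m.isEmpty then some (fv.1, m) else none) := by
  induction fs generalizing d with
  | nil => simp
  | cons fv t ih =>
    simp only [List.foldl_cons, List.filterMap_cons]
    have hfv : d.contains fv.1 = false := hfresh fv List.mem_cons_self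
    have hndt : (t.map Prod.fst).Nodup := by
      simp only [List.map_cons, List.nodup_cons] at hnd; exact hnd.2
    have hne : ∀ gv ∈ t, gv.1 ≠ fv.1 := by
      intro gv hgv heq
      simp only [List.map_cons, List.nodup_cons] at hnd
      exact hnd.1 (heq ▸ List.mem_map.mpr ⟨gv, hgv, rfl⟩)
    cases hm : (words.filter (fun w => fv.2.contains w)).isEmpty with
    | true =>
      rw [show pvAstep words d fv = d from by
        simp only [pvAstep, hm, Bool.not_true, Bool.false_eq_true, if_false]]
      rw [ih d (fun gv hgv => hfresh gv (List.mem_cons_of_mem _ hgv)) hndt]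
      simp only [Bool.not_true, Bool.false_eq_true, if_false]
    | false =>
      rw [show pvAstep words d fv = d.insert fv.1 (words.filter (fun w => fv.2.contains w)) from by
        simp only [pvAstep, hm, Bool.not_false, if_true]]
      rw [ih _ (fun gv hgv => by
          rw [PySem.Dict.contains_insert]
          simp only [Bool.or_eq_false_iff]
          exact ⟨by simpa using hne gv hgv, hfresh gv (List.mem_cons_of_mem _ hgv)⟩) hndt]
      rw [PySem.Dict.items_insert_of_not_contains _ _ hfv]
      simp only [Bool.not_false, if_true, List.append_assoc, List.singleton_append]

-- ===== VERDICT (by name: the statement is the Claim_ definition above) =====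
set_option maxRecDepth 100000 in
theorem identify_word_semantic_fields_py_spec : Claim_equal_identify_word_semantic_fields_py := by
  intro words _
  show identify_word_semantic_fields_py words = identify_word_semantic_fields_py_alt words
  -- A's side
  rw [identify_word_semantic_fields_py,
    pvA_items words pvFields PySem.Dict.empty (by intro fv _; rfl) (by decide)]
  -- B's side
  rw [identify_word_semantic_fields_py_alt]
  set g0 : PySem.Dict String (List String) :=
    pvFields.foldl (fun d fv => d.insert fv.1 []) PySem.Dict.empty with hg0
  have hk0 : ∀ f, f ∈ pvFields.map Prod.fst → g0.contains f = true := by decide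
  have hkeys : (words.foldl pvBstep g0).keys = g0.keys := pvB_keys words g0 hk0
  have hnd : (words.foldl pvBstep g0).keys.Nodup := by
    rw [hkeys]; decide
  rw [PySem.Dict.items_eq_map_keys _ hnd ([] : List String), hkeys,
    show g0.keys = ["emotion", "nature", "technology", "time", "space", "abstract"] from by decide]
  simp only [List.map_cons, List.map_nil, pvB_getD words g0]
  rw [show g0.getD "emotion" [] = [] from by decide, show g0.getD "nature" [] = [] from by decide,
    show g0.getD "technology" [] = [] from by decide, show g0.getD "time" [] = [] from by decide,
    show g0.getD "space" [] = [] from by decide, show g0.getD "abstract" [] = [] from by decide]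
  rw [funext (pvFieldOf_spec "emotion" ["happy", "sad", "angry", "excited", "calm", "nervous", "joy", "fear"] (by decide)),
    funext (pvFieldOf_spec "nature" ["tree", "flower", "river", "mountain", "sky", "earth", "wind", "fire"] (by decide)),
    funext (pvFieldOf_spec "technology" ["computer", "algorithm", "digital", "network", "system", "data"] (by decide)),
    funext (pvFieldOf_spec "time" ["past", "future", "now", "yesterday", "tomorrow", "eternal", "moment"] (by decide)),
    funext (pvFieldOf_spec "space" ["above", "below", "near", "far", "inside", "outside", "dimension"] (by decide)),
    funext (pvFieldOf_spec "abstract" ["concept", "idea", "thought", "theory", "principle", "essence"] (by decide))]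
  rw [show PySem.Dict.empty.items = ([] : List (String × List String)) from rfl]
  simp only [pvFields, List.filterMap_cons, List.filterMap_nil, List.filter_cons, List.filter_nil,
    List.nil_append]
  cases h1 : (words.filter (fun w => ["happy", "sad", "angry", "excited", "calm", "nervous", "joy", "fear"].contains w)).isEmpty <;>
  cases h2 : (words.filter (fun w => ["tree", "flower", "river", "mountain", "sky", "earth", "wind", "fire"].contains w)).isEmpty <;>
  cases h3 : (words.filter (fun w => ["computer", "algorithm", "digital", "network", "system", "data"].contains w)).isEmpty <;>
  cases h4 : (words.filter (fun w => ["past", "future", "now", "yesterday", "tomorrow", "eternal", "moment"].contains w)).isEmpty <;>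
  cases h5 : (words.filter (fun w => ["above", "below", "near", "far", "inside", "outside", "dimension"].contains w)).isEmpty <;>
  cases h6 : (words.filter (fun w => ["concept", "idea", "thought", "theory", "principle", "essence"].contains w)).isEmpty <;>
  simp only [Bool.not_true, Bool.not_false,    Bool.false_eq_true, if_false, if_true]
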